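-- pv_equiv track=rewrite | github.com/Sekai0NI0itamio/h01g20812g01h0 | automation/thumbnail.py | build_thumbnail_meme_query
-- ===== SOURCE A (Python) =====
-- def build_thumbnail_meme_query(title, prompt=None):
--     combined = f"{title or ''} {prompt or ''}".lower()
--     if any(keyword in combined for keyword in ["angry", "furious", "slam", "fight", "war", "chaos"]):
--         return "dramatic phone chat screenshot argument meme with unread texts"
--     if any(keyword in combined for keyword in ["side eye", "awkward", "embarrass", "cringe"]):
--         return "awkward group chat screenshot meme with side eye energy"
--     if any(keyword in combined for keyword in ["cute", "crush", "beauty", "flirt", "blush"]):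
--         return "flirty text message screenshot meme with blush reaction"
--     if any(keyword in combined for keyword in ["confused", "wonder", "comment", "think"]):
--         return "confused chat history screenshot meme with reaction messages"
--     return "funny chat history screenshot meme conversation on phone"
-- ===== SOURCE B (Python) =====
-- # B: single left-to-right position scan over the combined text (naive multi-pattern
-- # matcher): at every position, check which keywords start there and keep the best
-- # (lowest-priority-number) category seen; finally index the response table.
-- _KEYWORDS = [
--     ("angry", 0), ("furious", 0), ("slam", 0), ("fight", 0), ("war", 0), ("chaos", 0),
--     ("side eye", 1), ("awkward", 1), ("embarrass", 1), ("cringe", 1),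
--     ("cute", 2), ("crush", 2), ("beauty", 2), ("flirt", 2), ("blush", 2),
--     ("confused", 3), ("wonder", 3), ("comment", 3), ("think", 3),
-- ]
-- _RESPONSES = [
--     "dramatic phone chat screenshot argument meme with unread texts",
--     "awkward group chat screenshot meme with side eye energy",
--     "flirty text message screenshot meme with blush reaction",
--     "confused chat history screenshot meme with reaction messages",
--     "funny chat history screenshot meme conversation on phone",
-- ]
--
--
-- def build_thumbnail_meme_query(title, prompt=None):
--     combined = f"{title or ''} {prompt or ''}".lower()
--     best = 4
--     for i in range(len(combined)):
--         for kw, cat in _KEYWORDS: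
--             if cat < best and combined.startswith(kw, i):
--                 best = cat
--     return _RESPONSES[best]
-- ===== Notes on version B (the rewrite author's own statement) =====
-- stated objective: alternative
-- what changed: Instead of A's four ordered per-category substring-containment tests, B does one left-to-right position scan of the combined text like a naive multi-pattern matcher, checking at each index which keywords start there and keeping the minimum category number, then indexes a response table.
import Mathlib
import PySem

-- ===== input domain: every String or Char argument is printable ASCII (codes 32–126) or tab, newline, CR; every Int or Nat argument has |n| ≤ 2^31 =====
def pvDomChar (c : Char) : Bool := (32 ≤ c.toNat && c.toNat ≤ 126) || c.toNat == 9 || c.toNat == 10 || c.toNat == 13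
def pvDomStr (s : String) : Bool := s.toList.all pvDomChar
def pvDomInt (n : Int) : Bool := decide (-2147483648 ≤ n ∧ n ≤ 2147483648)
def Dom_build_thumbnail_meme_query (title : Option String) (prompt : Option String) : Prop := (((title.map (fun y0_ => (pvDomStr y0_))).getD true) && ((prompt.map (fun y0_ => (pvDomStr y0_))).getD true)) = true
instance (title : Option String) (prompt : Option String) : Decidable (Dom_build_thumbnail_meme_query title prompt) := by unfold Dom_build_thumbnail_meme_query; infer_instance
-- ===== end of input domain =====

-- B replaces A's four ordered per-category substring tests by one position scan of the
-- combined text (naive multi-pattern matcher) that keeps the minimum category number (alternative).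

-- ===== PORT A =====
-- A, step for step: combined = f"{title or ''} {prompt or ''}".lower(), then four if/any substring checks in order.
def build_thumbnail_meme_query (title : Option String) (prompt : Option String) : String :=
  let combined := PySem.Chars.lower ((title.getD "").toList ++ ' ' :: (prompt.getD "").toList)
  if (["angry", "furious", "slam", "fight", "war", "chaos"].any
      (fun keyword => PySem.Chars.isIn keyword.toList combined)) then
    "dramatic phone chat screenshot argument meme with unread texts"
  else if (["side eye", "awkward", "embarrass", "cringe"].any
      (fun keyword => PySem.Chars.isIn keyword.toList combined)) then
    "awkward group chat screenshot meme with side eye energy"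
  else if (["cute", "crush", "beauty", "flirt", "blush"].any
      (fun keyword => PySem.Chars.isIn keyword.toList combined)) then
    "flirty text message screenshot meme with blush reaction"
  else if (["confused", "wonder", "comment", "think"].any
      (fun keyword => PySem.Chars.isIn keyword.toList combined)) then
    "confused chat history screenshot meme with reaction messages"
  else
    "funny chat history screenshot meme conversation on phone"

-- ===== PORT B =====
-- Source B's _KEYWORDS table: (keyword, category number), in Source B's order.
def pvKEYWORDS : List (String × Nat) :=
  [ ("angry", 0), ("furious", 0), ("slam", 0), ("fight", 0), ("war", 0), ("chaos", 0),
    ("side eye", 1), ("awkward", 1), ("embarrass", 1), ("cringe", 1),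
    ("cute", 2), ("crush", 2), ("beauty", 2), ("flirt", 2), ("blush", 2),
    ("confused", 3), ("wonder", 3), ("comment", 3), ("think", 3) ]

-- Source B's _RESPONSES table (index 4 = the default).
def pvRESPONSES : List String :=
  [ "dramatic phone chat screenshot argument meme with unread texts",
    "awkward group chat screenshot meme with side eye energy",
    "flirty text message screenshot meme with blush reaction",
    "confused chat history screenshot meme with reaction messages",
    "funny chat history screenshot meme conversation on phone" ]

-- Source B's inner loop body: 'for kw, cat in _KEYWORDS: if cat < best and combined.startswith(kw, i): best = cat'.
-- combined.startswith(kw, i) with 0 ≤ i is exactly: kw is a prefix of combined[i:] (= drop).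
def pvInner (p : List Char) (kws : List (String × Nat)) (b : Nat) : Nat :=
  kws.foldl
    (fun b kc =>
      if decide (kc.2 < b) && PySem.Chars.startswith p kc.1.toList then kc.2 else b) b

-- Source B's outer loop: 'for i in range(len(combined)): …'.
def pvOuter (cs : List Char) (L : List Int) (b : Nat) : Nat :=
  L.foldl (fun best i => pvInner (cs.drop i.toNat) pvKEYWORDS best) b

def pvScan (cs : List Char) : Nat :=
  pvOuter cs (PySem.List.pyRange 0 (cs.length : Int) 1) 4

-- _RESPONSES[best]: best is always ≤ 4 (the loop only lowers it), so the index is in range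
-- and List.getD's default is never used.
def build_thumbnail_meme_query_alt (title : Option String) (prompt : Option String) : String :=
  let combined := PySem.Chars.lower ((title.getD "").toList ++ ' ' :: (prompt.getD "").toList)
  pvRESPONSES.getD (pvScan combined) ""

-- ===== PRECONDITION & SPEC =====
def Spec_build_thumbnail_meme_query (title : Option String) (prompt : Option String) (out : String) : Prop := out = build_thumbnail_meme_query_alt title prompt
instance (title : Option String) (prompt : Option String) (out : String) : Decidable (Spec_build_thumbnail_meme_query title prompt out) := by unfold Spec_build_thumbnail_meme_query; infer_instance

-- ===== CLAIM (what is proved, stated in full; the proofs are below) =====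
def Claim_equal_build_thumbnail_meme_query : Prop := ∀ (title : Option String) (prompt : Option String), Dom_build_thumbnail_meme_query title prompt → Spec_build_thumbnail_meme_query title prompt (build_thumbnail_meme_query title prompt)

-- ===== LEMMAS AND PROOFS =====

lemma pvInner_cons (p : List Char) (kc : String × Nat) (kws : List (String × Nat)) (b : Nat) :
    pvInner p (kc :: kws) b
      = pvInner p kws
          (if decide (kc.2 < b) && PySem.Chars.startswith p kc.1.toList then kc.2 else b) := rfl

lemma pvInner_le (p : List Char) (kws : List (String × Nat)) :
    ∀ b, pvInner p kws b ≤ b := by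
  induction kws with
  | nil => intro b; exact le_refl b
  | cons kc rest ih =>
    intro b
    rw [pvInner_cons]
    by_cases h : (decide (kc.2 < b) && PySem.Chars.startswith p kc.1.toList) = true
    · rw [if_pos h]
      have h1 : kc.2 < b := by
        have h' := h
        simp only [Bool.and_eq_true, decide_eq_true_eq] at h'
        exact h'.1
      exact le_trans (ih kc.2) (le_of_lt h1)
    · rw [if_neg h]; exact ih b

lemma pvInner_sound (p : List Char) (kws : List (String × Nat)) :
    ∀ b, pvInner p kws b = b ∨
      ∃ kc ∈ kws, pvInner p kws b = kc.2 ∧ PySem.Chars.startswith p kc.1.toList = true := by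
  induction kws with
  | nil => intro b; exact Or.inl rfl
  | cons kc rest ih =>
    intro b
    rw [pvInner_cons]
    by_cases h : (decide (kc.2 < b) && PySem.Chars.startswith p kc.1.toList) = true
    · rw [if_pos h]
      have h' := h
      simp only [Bool.and_eq_true, decide_eq_true_eq] at h'
      rcases ih kc.2 with he | ⟨kc', hm, he, hs⟩
      · exact Or.inr ⟨kc, List.mem_cons_self, he, h'.2⟩
      · exact Or.inr ⟨kc', List.mem_cons_of_mem _ hm, he, hs⟩
    · rw [if_neg h]
      rcases ih b with he | ⟨kc', hm, he, hs⟩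
      · exact Or.inl he
      · exact Or.inr ⟨kc', List.mem_cons_of_mem _ hm, he, hs⟩

lemma pvInner_complete (p : List Char) (kws : List (String × Nat)) :
    ∀ b, ∀ kc ∈ kws, PySem.Chars.startswith p kc.1.toList = true → pvInner p kws b ≤ kc.2 := by
  induction kws with
  | nil => intro b kc h; exact absurd h (List.not_mem_nil)
  | cons kd rest ih =>
    intro b kc hm hs
    rw [pvInner_cons]
    rcases List.mem_cons.mp hm with rfl | hm'
    · by_cases hlt : kc.2 < b
      · rw [if_pos (by simp [hlt, hs])]
        exact pvInner_le _ _ _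
      · rw [if_neg (by simp [hlt])]
        exact le_trans (pvInner_le _ _ _) (Nat.le_of_not_lt hlt)
    · exact ih _ kc hm' hs

lemma pvOuter_cons (cs : List Char) (i : Int) (L : List Int) (b : Nat) :
    pvOuter cs (i :: L) b = pvOuter cs L (pvInner (cs.drop i.toNat) pvKEYWORDS b) := by
  simp only [pvOuter, List.foldl_cons]

lemma pvOuter_le (cs : List Char) (L : List Int) :
    ∀ b, pvOuter cs L b ≤ b := by
  induction L with
  | nil => intro b; exact le_refl b
  | cons i rest ih =>
    intro b
    rw [pvOuter_cons]
    exact le_trans (ih _) (pvInner_le _ _ _)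

lemma pvOuter_sound (cs : List Char) (L : List Int) :
    ∀ b, pvOuter cs L b = b ∨
      ∃ kc ∈ pvKEYWORDS, ∃ i ∈ L, pvOuter cs L b = kc.2 ∧
        PySem.Chars.startswith (cs.drop i.toNat) kc.1.toList = true := by
  induction L with
  | nil => intro b; exact Or.inl rfl
  | cons j rest ih =>
    intro b
    rw [pvOuter_cons]
    rcases ih (pvInner (cs.drop j.toNat) pvKEYWORDS b) with he | ⟨kc, hkc, i, hi, he, hs⟩
    · rcases pvInner_sound (cs.drop j.toNat) pvKEYWORDS b with hb | ⟨kc, hkc, hb, hs⟩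
      · exact Or.inl (he.trans hb)
      · exact Or.inr ⟨kc, hkc, j, List.mem_cons_self, he.trans hb, hs⟩
    · exact Or.inr ⟨kc, hkc, i, List.mem_cons_of_mem _ hi, he, hs⟩

lemma pvOuter_complete (cs : List Char) (L : List Int) :
    ∀ b, ∀ kc ∈ pvKEYWORDS, ∀ i ∈ L,
      PySem.Chars.startswith (cs.drop i.toNat) kc.1.toList = true → pvOuter cs L b ≤ kc.2 := by
  induction L with
  | nil => intro b kc _ i hi; exact absurd hi (List.not_mem_nil)
  | cons j rest ih =>
    intro b kc hkc i hi hs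
    rw [pvOuter_cons]
    rcases List.mem_cons.mp hi with rfl | hi'
    · exact le_trans (pvOuter_le _ _ _) (pvInner_complete _ _ _ kc hkc hs)
    · exact ih _ kc hkc i hi' hs

-- 'category c has a keyword occurring in cs'
def pvHit (cs : List Char) (c : Nat) : Prop :=
  ∃ kc ∈ pvKEYWORDS, kc.2 = c ∧ PySem.Chars.isIn kc.1.toList cs = true

lemma pvKw_ne : ∀ kc ∈ pvKEYWORDS, kc.1.toList ≠ [] := by decide

lemma pvKw_lt4 : ∀ kc ∈ pvKEYWORDS, kc.2 < 4 := by decide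

lemma pvIsIn_exists_pos (sub cs : List Char) (h : sub ≠ []) :
    PySem.Chars.isIn sub cs = true ↔
      ∃ i ∈ PySem.List.pyRange 0 (cs.length : Int) 1, sub <+: cs.drop i.toNat := by
  constructor
  · intro hin
    obtain ⟨j, hj⟩ := (PySem.Chars.exists_prefix_drop_iff_isIn sub cs).mpr hin
    have hjlt : j < cs.length := by
      by_contra hge
      rw [List.drop_eq_nil_of_le (Nat.le_of_not_lt hge)] at hj
      exact h (List.prefix_nil.mp hj)
    refine ⟨(j : Int), ?_, by simpa using hj⟩
    rw [PySem.List.mem_pyRange_one]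
    exact ⟨Int.natCast_nonneg j, by exact_mod_cast hjlt⟩
  · rintro ⟨i, _, hpre⟩
    exact (PySem.Chars.exists_prefix_drop_iff_isIn sub cs).mp ⟨i.toNat, hpre⟩

lemma pvScan_le_of_hit (cs : List Char) (c : Nat) (hc : pvHit cs c) : pvScan cs ≤ c := by
  obtain ⟨kc, hm, hc2, hin⟩ := hc
  obtain ⟨i, hiL, hpre⟩ := (pvIsIn_exists_pos _ _ (pvKw_ne kc hm)).mp hin
  have := pvOuter_complete cs (PySem.List.pyRange 0 (cs.length : Int) 1) 4 kc hm i hiL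
    ((PySem.Chars.startswith_iff _ _).mpr hpre)
  rw [hc2] at this
  exact this

lemma pvScan_cases (cs : List Char) : pvScan cs = 4 ∨ pvHit cs (pvScan cs) := by
  rcases pvOuter_sound cs (PySem.List.pyRange 0 (cs.length : Int) 1) 4 with h | ⟨kc, hm, i, hiL, he, hs⟩
  · exact Or.inl h
  · refine Or.inr ⟨kc, hm, he.symm, ?_⟩
    exact (pvIsIn_exists_pos _ _ (pvKw_ne kc hm)).mpr ⟨i, hiL, (PySem.Chars.startswith_iff _ _).mp hs⟩

lemma pvHit0_iff (cs : List Char) :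
    pvHit cs 0 ↔ (["angry", "furious", "slam", "fight", "war", "chaos"].any
      (fun keyword => PySem.Chars.isIn keyword.toList cs)) = true := by
  simp [pvHit, pvKEYWORDS]

lemma pvHit1_iff (cs : List Char) :
    pvHit cs 1 ↔ (["side eye", "awkward", "embarrass", "cringe"].any
      (fun keyword => PySem.Chars.isIn keyword.toList cs)) = true := by
  simp [pvHit, pvKEYWORDS]

lemma pvHit2_iff (cs : List Char) :
    pvHit cs 2 ↔ (["cute", "crush", "beauty", "flirt", "blush"].any
      (fun keyword => PySem.Chars.isIn keyword.toList cs)) = true := by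
  simp [pvHit, pvKEYWORDS]

lemma pvHit3_iff (cs : List Char) :
    pvHit cs 3 ↔ (["confused", "wonder", "comment", "think"].any
      (fun keyword => PySem.Chars.isIn keyword.toList cs)) = true := by
  simp [pvHit, pvKEYWORDS]

lemma pvMain (cs : List Char) :
    (if (["angry", "furious", "slam", "fight", "war", "chaos"].any
        (fun keyword => PySem.Chars.isIn keyword.toList cs)) then
      "dramatic phone chat screenshot argument meme with unread texts"
    else if (["side eye", "awkward", "embarrass", "cringe"].any
        (fun keyword => PySem.Chars.isIn keyword.toList cs)) then
      "awkward group chat screenshot meme with side eye energy"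
    else if (["cute", "crush", "beauty", "flirt", "blush"].any
        (fun keyword => PySem.Chars.isIn keyword.toList cs)) then
      "flirty text message screenshot meme with blush reaction"
    else if (["confused", "wonder", "comment", "think"].any
        (fun keyword => PySem.Chars.isIn keyword.toList cs)) then
      "confused chat history screenshot meme with reaction messages"
    else
      "funny chat history screenshot meme conversation on phone")
    = pvRESPONSES.getD (pvScan cs) "" := by
  by_cases h0 : (["angry", "furious", "slam", "fight", "war", "chaos"].any
      (fun keyword => PySem.Chars.isIn keyword.toList cs)) = true
  · have hs : pvScan cs = 0 := Nat.le_zero.mp (pvScan_le_of_hit cs 0 ((pvHit0_iff cs).mpr h0))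
    rw [hs, if_pos h0]; rfl
  · by_cases h1 : (["side eye", "awkward", "embarrass", "cringe"].any
        (fun keyword => PySem.Chars.isIn keyword.toList cs)) = true
    · have hle : pvScan cs ≤ 1 := pvScan_le_of_hit cs 1 ((pvHit1_iff cs).mpr h1)
      have hs : pvScan cs = 1 := by
        rcases pvScan_cases cs with h4 | hh
        · omega
        · rcases Nat.lt_or_ge (pvScan cs) 1 with h' | h'
          · have h0' : pvScan cs = 0 := by omega
            rw [h0'] at hh
            exact absurd ((pvHit0_iff cs).mp hh) h0
          · omega
      rw [hs, if_neg h0, if_pos h1]; rfl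
    · by_cases h2 : (["cute", "crush", "beauty", "flirt", "blush"].any
          (fun keyword => PySem.Chars.isIn keyword.toList cs)) = true
      · have hle : pvScan cs ≤ 2 := pvScan_le_of_hit cs 2 ((pvHit2_iff cs).mpr h2)
        have hs : pvScan cs = 2 := by
          rcases pvScan_cases cs with h4 | hh
          · omega
          · have h01 : pvScan cs = 0 ∨ pvScan cs = 1 ∨ pvScan cs = 2 := by omega
            rcases h01 with h' | h' | h'
            · rw [h'] at hh; exact absurd ((pvHit0_iff cs).mp hh) h0
            · rw [h'] at hh; exact absurd ((pvHit1_iff cs).mp hh) h1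
            · exact h'
        rw [hs, if_neg h0, if_neg h1, if_pos h2]; rfl
      · by_cases h3 : (["confused", "wonder", "comment", "think"].any
            (fun keyword => PySem.Chars.isIn keyword.toList cs)) = true
        · have hle : pvScan cs ≤ 3 := pvScan_le_of_hit cs 3 ((pvHit3_iff cs).mpr h3)
          have hs : pvScan cs = 3 := by
            rcases pvScan_cases cs with h4 | hh
            · omega
            · have h012 : pvScan cs = 0 ∨ pvScan cs = 1 ∨ pvScan cs = 2 ∨ pvScan cs = 3 := by omega
              rcases h012 with h' | h' | h' | h'
              · rw [h'] at hh; exact absurd ((pvHit0_iff cs).mp hh) h0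
              · rw [h'] at hh; exact absurd ((pvHit1_iff cs).mp hh) h1
              · rw [h'] at hh; exact absurd ((pvHit2_iff cs).mp hh) h2
              · exact h'
          rw [hs, if_neg h0, if_neg h1, if_neg h2, if_pos h3]; rfl
        · have hs : pvScan cs = 4 := by
            rcases pvScan_cases cs with h4 | hh
            · exact h4
            · have hlt : pvScan cs < 4 := by
                obtain ⟨kc, hkc, hc2, _⟩ := hh
                exact hc2 ▸ pvKw_lt4 kc hkc
              have h0123 : pvScan cs = 0 ∨ pvScan cs = 1 ∨ pvScan cs = 2 ∨ pvScan cs = 3 := by omega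
              rcases h0123 with h' | h' | h' | h'
              · rw [h'] at hh; exact absurd ((pvHit0_iff cs).mp hh) h0
              · rw [h'] at hh; exact absurd ((pvHit1_iff cs).mp hh) h1
              · rw [h'] at hh; exact absurd ((pvHit2_iff cs).mp hh) h2
              · rw [h'] at hh; exact absurd ((pvHit3_iff cs).mp hh) h3
          rw [hs, if_neg h0, if_neg h1, if_neg h2, if_neg h3]; rfl

-- ===== VERDICT (by name: the statement is the Claim_ definition above) =====
theorem build_thumbnail_meme_query_spec : Claim_equal_build_thumbnail_meme_query := by
  intro title prompt _
  unfold Spec_build_thumbnail_meme_query build_thumbnail_meme_query build_thumbnail_meme_query_alt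
  exact pvMain _
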